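-- pv_equiv track=rewrite | github.com/jaredblack/leetcode | 1807.evaluatebracketpairs.py | evaluate
-- ===== SOURCE A (Python) =====
-- def evaluate(s: str, knowledge: list[list[str]]) -> str:
--     know_dict = {pair[0]:pair[1] for pair in knowledge}
--     final = s
--     i = 0
--     while i < len(s):
--         if s[i] == '(':
--             start = i
--             end = i
--             for j in range(i, len(s)):
--                 if s[j] == ')':
--                     end = j
--                     break
--             key = s[i+1:end]
--             if key in know_dict:
--                 final = final.replace(s[start:end+1], know_dict[key])
--             else:
--                 final = final.replace(s[start:end+1], '?')
--             i = end
--         i += 1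
--     return final
-- ===== SOURCE B (Python) =====
-- def evaluate(s: str, knowledge: list[list[str]]) -> str:
--     know = {}
--     for pair in knowledge:
--         know[pair[0]] = pair[1]
--     out = []
--     key = None
--     for c in s:
--         if key is None:
--             if c == '(':
--                 key = []
--             else:
--                 out.append(c)
--         elif c == ')':
--             out.append(know.get(''.join(key), '?'))
--             key = None
--         else:
--             key.append(c)
--     if key is not None:
--         out.append('(' + ''.join(key))
--     return ''.join(out)
-- ===== Notes on version B (the rewrite author's own statement) =====
-- stated objective: faster
-- what changed: B replaces A's per-bracket global str.replace rescans of the whole string with a single left-to-right state-machine pass that emits an output buffer, looking each bracket key up in the dict once.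
-- outside the precondition, e.g. on evaluate('(', []): A returns '?', B returns '('; on evaluate('(a)x(b(a)', []): A returns '?x(b?', B returns '?x?'; on evaluate('(a)(b)', [['a', '(b)'], ['b', '!']]): A returns '!!', B returns '(b)!'
import Mathlib
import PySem

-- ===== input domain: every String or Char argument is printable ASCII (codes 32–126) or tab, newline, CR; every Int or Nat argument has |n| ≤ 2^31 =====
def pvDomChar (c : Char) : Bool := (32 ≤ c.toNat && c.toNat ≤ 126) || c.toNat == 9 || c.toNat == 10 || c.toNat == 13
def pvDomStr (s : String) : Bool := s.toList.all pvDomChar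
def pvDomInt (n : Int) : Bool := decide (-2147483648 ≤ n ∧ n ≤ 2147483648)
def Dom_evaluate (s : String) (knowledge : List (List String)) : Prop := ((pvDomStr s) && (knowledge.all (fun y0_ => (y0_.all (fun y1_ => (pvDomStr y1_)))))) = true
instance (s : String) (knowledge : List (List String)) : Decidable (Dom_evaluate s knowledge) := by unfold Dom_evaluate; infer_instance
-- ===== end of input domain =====

-- B substitutes each '(key)' in one O(n) left-to-right pass with an output buffer instead of
-- A's per-bracket global str.replace rescans; equality is proved on well-formed inputs (Pre_).

-- B substitutes each '(key)' in one left-to-right pass with an output buffer instead of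
-- A's per-bracket global str.replace rescans; equality is proved on well-formed inputs (Pre_).

-- ===== PORT A =====

-- port of A's inner 'for j in range(i, len(s)): if s[j] == ")": end = j; break' (default end = i)
def evalFindEnd (s : List Char) (i j : Nat) : Nat :=
  if h : j < s.length then
    if s[j] = ')' then j else evalFindEnd s i (j + 1)
  else i
termination_by s.length - j

-- needed by evalLoop's termination: the found end is never left of i
theorem le_evalFindEnd (s : List Char) (i j : Nat) (hij : i ≤ j) : i ≤ evalFindEnd s i j := by
  unfold evalFindEnd
  split
  · split
    · exact hij
    · exact le_evalFindEnd s i (j + 1) (by omega)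
  · exact le_refl i
termination_by s.length - j

-- port of A's while loop: final is rewritten by str.replace at each '(' of s
def evalLoop (s : List Char) (d : PySem.Dict (List Char) (List Char))
    (final : List Char) (i : Nat) : List Char :=
  if h : i < s.length then
    if s[i] = '(' then
      let e := evalFindEnd s i i
      let key := PySem.List.slice s (some ((i : Int) + 1)) (some (e : Int))
      let pat := PySem.List.slice s (some (i : Int)) (some ((e : Int) + 1))
      let final' := match PySem.Dict.get? d key with
        | some v => PySem.Chars.replace final pat v
        | none => PySem.Chars.replace final pat ['?']
      evalLoop s d final' (e + 1)
    else evalLoop s d final (i + 1)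
  else final
termination_by s.length - i
decreasing_by
  · have := le_evalFindEnd s i i (le_refl i); omega
  · omega

def evaluate (s : String) (knowledge : List (List String)) : String :=
  let d := knowledge.foldl
    (fun d pair => PySem.Dict.insert d (pair.getD 0 "").toList (pair.getD 1 "").toList)
    (PySem.Dict.empty : PySem.Dict (List Char) (List Char))
  String.ofList (evalLoop s.toList d s.toList 0)

-- ===== PORT B =====

-- one step of B's for-loop state machine: state = (output buffer, current bracket key or none)
def altStep (d : PySem.Dict (List Char) (List Char))
    (st : List Char × Option (List Char)) (c : Char) : List Char × Option (List Char) :=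
  match st with
  | (out, none) => if c = '(' then (out, some []) else (out ++ [c], none)
  | (out, some k) =>
      if c = ')' then (out ++ PySem.Dict.getD d k ['?'], none) else (out, some (k ++ [c]))

def evaluate_alt (s : String) (knowledge : List (List String)) : String :=
  let d := knowledge.foldl
    (fun d pair => PySem.Dict.insert d (pair.getD 0 "").toList (pair.getD 1 "").toList)
    (PySem.Dict.empty : PySem.Dict (List Char) (List Char))
  let st := s.toList.foldl (altStep d) ([], none)
  String.ofList (match st.2 with
    | none => st.1
    | some k => st.1 ++ '(' :: k)

-- ===== PRECONDITION & SPEC =====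

-- grammar check (a three-state scan): every '(' opens '(key)' with a key free of '(' and ')'
def okS : Bool → List Char → Bool
  | false, [] => true
  | true, [] => false
  | false, c :: t => if c = '(' then okS true t else okS false t
  | true, c :: t => if c = ')' then okS false t else if c = '(' then false else okS true t

-- Pre_ excludes knowledge rows shorter than 2 (A raises IndexError there) and, where A still
-- returns, strings with an unmatched '(' or a '(' inside a key, and replacement values that
-- contain '(' while their own '(key)' occurs in s: there A's global str.replace can rewrite
-- text far from the bracket being processed (an accident of rescanning `final`), a corner the
-- problem leaves unspecified.
def Pre_evaluate (s : String) (knowledge : List (List String)) : Prop :=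
  okS false s.toList = true ∧
    ∀ pair ∈ knowledge, 2 ≤ pair.length ∧
      (PySem.Chars.isIn ('(' :: ((pair.getD 0 "").toList ++ [')'])) s.toList = false ∨
        '(' ∉ (pair.getD 1 "").toList)

instance (s : String) (knowledge : List (List String)) : Decidable (Pre_evaluate s knowledge) := by
  unfold Pre_evaluate; infer_instance

def pvWitness_evaluate : String × List (List String) := ("(a)x(b)", [["a", "yz"], ["c", "w"]])

def Spec_evaluate (s : String) (knowledge : List (List String)) (out : String) : Prop :=
  out = evaluate_alt s knowledge
instance (s : String) (knowledge : List (List String)) (out : String) :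
    Decidable (Spec_evaluate s knowledge out) := by unfold Spec_evaluate; infer_instance

-- ===== CLAIM (what is proved, stated in full; the proofs are below) =====
def Claim_equal_evaluate : Prop := ∀ (s : String) (knowledge : List (List String)),
  Dom_evaluate s knowledge → Pre_evaluate s knowledge →
    Spec_evaluate s knowledge (evaluate s knowledge)

-- ===== LEMMAS AND PROOFS =====

-- items of the parse: single non-'(' characters, and brackets '(key)'
inductive PItem : Type
  | txt : Char → PItem
  | br : List Char → PItem
deriving DecidableEq, Repr

def renderI : PItem → List Char
  | .txt c => [c]
  | .br k => '(' :: (k ++ [')'])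

def goodI : PItem → Prop
  | .txt c => c ≠ '('
  | .br k => '(' ∉ k ∧ ')' ∉ k

def subV (d : PySem.Dict (List Char) (List Char)) (k : List Char) : List Char :=
  PySem.Dict.getD d k ['?']

def substF (d : PySem.Dict (List Char) (List Char)) (K : List (List Char)) : PItem → List Char
  | .txt c => [c]
  | .br k => if k ∈ K then subV d k else renderI (.br k)

-- the string with every bracket whose key is in K already substituted
def substK (d : PySem.Dict (List Char) (List Char)) (K : List (List Char))
    (items : List PItem) : List Char :=
  items.flatMap (substF d K)

def substA (d : PySem.Dict (List Char) (List Char)) : PItem → List Char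
  | .txt c => [c]
  | .br k => subV d k

def substAll (d : PySem.Dict (List Char) (List Char)) (items : List PItem) : List Char :=
  items.flatMap (substA d)

theorem drop_head_eq {cs : List Char} {i : Nat} {c : Char} {w : List Char}
    (hd : cs.drop i = c :: w) : ∃ hi : i < cs.length, cs[i] = c := by
  have hi : i < cs.length := by
    by_contra h
    rw [List.drop_eq_nil_of_le (by omega)] at hd
    simp at hd
  refine ⟨hi, ?_⟩
  have h1 : cs[i + 0]? = some c := by
    rw [← List.getElem?_drop, hd]
    rfl
  have h2 : cs[i]? = some c := by simpa using h1
  exact (List.getElem_eq_iff hi).mpr h2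

-- structural model of CPython's leftmost non-overlapping str.replace (nonempty pattern)
def myRep (old new : List Char) : List Char → List Char
  | [] => []
  | c :: t =>
    if h : old.isPrefixOf (c :: t) = true ∧ old ≠ [] then
      new ++ myRep old new (List.drop old.length (c :: t))
    else c :: myRep old new t
termination_by l => l.length
decreasing_by
  · have : 1 ≤ old.length := List.length_pos_iff.mpr h.2
    simp only [List.length_drop, List.length_cons]
    omega
  · simp

theorem replace_go_eq (old new : List Char) (hold : old ≠ []) :
    ∀ fuel l acc, l.length ≤ fuel →
      PySem.Chars.replace.go old new fuel l acc = acc.reverse ++ myRep old new l := by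
  intro fuel
  induction fuel with
  | zero =>
    intro l acc hl
    have : l = [] := List.length_eq_zero_iff.mp (by omega)
    subst this
    simp [PySem.Chars.replace.go, myRep]
  | succ n ih =>
    intro l acc hl
    match l with
    | [] => simp [PySem.Chars.replace.go, myRep]
    | c :: t =>
      rw [PySem.Chars.replace.go]
      by_cases hp : old.isPrefixOf (c :: t) = true
      · rw [if_pos hp]
        have hlen : (List.drop old.length (c :: t)).length ≤ n := by
          have : 1 ≤ old.length := List.length_pos_iff.mpr hold
          simp only [List.length_drop, List.length_cons] at *
          omega
        rw [ih _ _ hlen]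
        rw [myRep, dif_pos ⟨hp, hold⟩]
        simp
      · rw [if_neg hp]
        have hlen : t.length ≤ n := by simp at hl; omega
        rw [ih _ _ hlen]
        rw [myRep, dif_neg (by simp [hp])]
        simp

theorem replace_eq_myRep (l old new : List Char) (hold : old ≠ []) :
    PySem.Chars.replace l old new = myRep old new l := by
  rw [PySem.Chars.replace]
  rw [if_neg (by simp [List.isEmpty_iff, hold])]
  simpa using replace_go_eq old new hold l.length l [] (le_refl _)

theorem myRep_nil (old new : List Char) : myRep old new [] = [] := by simp [myRep]

theorem myRep_cons_ne (k v w : List Char) (c : Char) (hc : c ≠ '(') :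
    myRep ('(' :: (k ++ [')'])) v (c :: w) = c :: myRep ('(' :: (k ++ [')'])) v w := by
  rw [myRep, dif_neg]
  intro h
  have h1 := h.1
  rw [List.isPrefixOf_iff_prefix] at h1
  rcases h1 with ⟨u, hu⟩
  simp at hu
  exact hc hu.1.symm

theorem myRep_txt (k v : List Char) (t : List Char) (ht : '(' ∉ t) (w : List Char) :
    myRep ('(' :: (k ++ [')'])) v (t ++ w) = t ++ myRep ('(' :: (k ++ [')'])) v w := by
  induction t with
  | nil => simp
  | cons c t ih =>
    have hc : c ≠ '(' := by intro h; exact ht (h ▸ List.mem_cons_self)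
    have ht' : '(' ∉ t := fun h => ht (List.mem_cons_of_mem _ h)
    rw [show (c :: t) ++ w = c :: (t ++ w) from rfl,
      myRep_cons_ne _ _ _ _ hc, ih ht']
    rfl

theorem myRep_pat (k v w : List Char) :
    myRep ('(' :: (k ++ [')'])) v (('(' :: (k ++ [')'])) ++ w)
      = v ++ myRep ('(' :: (k ++ [')'])) v w := by
  have hne : ('(' :: (k ++ [')'])) ≠ ([] : List Char) := by simp
  match hh : ('(' :: (k ++ [')'])) ++ w with
  | [] => simp at hh
  | c :: t =>
    rw [myRep, dif_pos]
    · rw [← hh, List.drop_left]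
    · constructor
      · rw [List.isPrefixOf_iff_prefix, ← hh]
        exact List.prefix_append _ _
      · exact hne

theorem not_pref_keys (w : List Char) :
    ∀ k k' : List Char, k ≠ k' → ')' ∉ k → ')' ∉ k' →
      ¬ (k ++ [')']) <+: (k' ++ ')' :: w) := by
  intro k
  induction k with
  | nil =>
    intro k' hne hk hk' hp
    match k' with
    | [] => exact hne rfl
    | c' :: t' =>
      rcases hp with ⟨u, hu⟩
      simp at hu
      exact hk' (hu.1 ▸ List.mem_cons_self)
  | cons c t ih =>
    intro k' hne hk hk' hp
    match k' with
    | [] =>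
      rcases hp with ⟨u, hu⟩
      simp at hu
      exact hk (hu.1 ▸ List.mem_cons_self)
    | c' :: t' =>
      rcases hp with ⟨u, hu⟩
      simp at hu
      obtain ⟨rfl, hu2⟩ := hu
      refine ih t' ?_ (fun h => hk (List.mem_cons_of_mem _ h))
        (fun h => hk' (List.mem_cons_of_mem _ h)) ⟨u, by simpa using hu2⟩
      intro h; exact hne (by rw [h])

theorem myRep_other (k v k' w : List Char) (hne : k' ≠ k)
    (hk : ')' ∉ k) (hk'p : '(' ∉ k') (hk'c : ')' ∉ k') :
    myRep ('(' :: (k ++ [')'])) v (('(' :: (k' ++ [')'])) ++ w)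
      = ('(' :: (k' ++ [')'])) ++ myRep ('(' :: (k ++ [')'])) v w := by
  rw [show ('(' :: (k' ++ [')'])) ++ w = '(' :: ((k' ++ [')']) ++ w) by simp]
  rw [myRep, dif_neg]
  · rw [myRep_txt k v (k' ++ [')']) (by simp [hk'p]) w]
    simp
  · intro h
    have h1 := h.1
    rw [List.isPrefixOf_iff_prefix] at h1
    have hpref : (k ++ [')']) <+: (k' ++ ')' :: w) := by
      rcases h1 with ⟨u, hu⟩
      simp only [List.cons_append, List.cons.injEq, List.append_assoc] at hu
      exact ⟨u, by simpa using hu.2⟩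
    exact not_pref_keys w k k' (fun h2 => hne h2.symm) hk hk'c hpref

theorem flatMap_congr_mem {α β : Type} (l : List α) (f g : α → List β)
    (h : ∀ a ∈ l, f a = g a) : l.flatMap f = l.flatMap g := by
  induction l with
  | nil => rfl
  | cons a t ih =>
    simp only [List.flatMap_cons, h a List.mem_cons_self,
      ih (fun b hb => h b (List.mem_cons_of_mem _ hb))]

theorem myRep_substK (d : PySem.Dict (List Char) (List Char)) (K : List (List Char))
    (HvK : ∀ k' ∈ K, '(' ∉ subV d k') (k : List Char) (hkp : '(' ∉ k) (hkc : ')' ∉ k)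
    (v : List Char) :
    ∀ items : List PItem, (∀ it ∈ items, goodI it) →
      myRep ('(' :: (k ++ [')'])) v (substK d K items)
        = items.flatMap (fun it => match it with
            | .txt c => [c]
            | .br k' => if k' ∈ K then subV d k' else if k' = k then v else renderI (.br k')) := by
  intro items
  induction items with
  | nil => intro _; simp [substK, myRep_nil]
  | cons it rest ih =>
    intro hg
    have hgit := hg it List.mem_cons_self
    have hgrest : ∀ x ∈ rest, goodI x := fun x hx => hg x (List.mem_cons_of_mem _ hx)
    rw [substK, List.flatMap_cons, List.flatMap_cons, ← substK]
    match it with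
    | .txt c =>
      have hc : c ≠ '(' := hgit
      rw [show substF d K (.txt c) = [c] from rfl, List.singleton_append,
        myRep_cons_ne _ _ _ _ hc, ih hgrest]
      rfl
    | .br k' =>
      obtain ⟨hk'p, hk'c⟩ : '(' ∉ k' ∧ ')' ∉ k' := hgit
      by_cases hKk : k' ∈ K
      · rw [show substF d K (.br k') = subV d k' by simp [substF, hKk]]
        rw [myRep_txt _ _ _ (HvK k' hKk), ih hgrest]
        simp [hKk]
      · by_cases hek : k' = k
        · subst hek
          rw [show substF d K (.br k') = '(' :: (k' ++ [')']) by simp [substF, hKk, renderI]]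
          rw [myRep_pat, ih hgrest]
          simp [hKk]
        · rw [show substF d K (.br k') = '(' :: (k' ++ [')']) by simp [substF, hKk, renderI]]
          rw [myRep_other k v k' _ hek hkc hk'p hk'c, ih hgrest]
          simp [hKk, hek, renderI]

theorem myRep_substK_mem (d : PySem.Dict (List Char) (List Char))
    (K : List (List Char)) (HvK : ∀ k' ∈ K, '(' ∉ subV d k')
    (k : List Char) (hkp : '(' ∉ k) (hkc : ')' ∉ k)
    (v : List Char) (hK : k ∈ K)
    (items : List PItem) (hg : ∀ it ∈ items, goodI it) :
    myRep ('(' :: (k ++ [')'])) v (substK d K items) = substK d K items := by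
  rw [myRep_substK d K HvK k hkp hkc v items hg]
  apply flatMap_congr_mem
  intro it _
  match it with
  | .txt c => rfl
  | .br k' =>
    by_cases h1 : k' ∈ K
    · simp [substF, h1]
    · have h2 : k' ≠ k := fun h => h1 (h ▸ hK)
      simp [substF, h1, h2]

theorem myRep_substK_new (d : PySem.Dict (List Char) (List Char))
    (K : List (List Char)) (HvK : ∀ k' ∈ K, '(' ∉ subV d k')
    (k : List Char) (hkp : '(' ∉ k) (hkc : ')' ∉ k)
    (items : List PItem) (hg : ∀ it ∈ items, goodI it) :
    myRep ('(' :: (k ++ [')'])) (subV d k) (substK d K items) = substK d (k :: K) items := by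
  rw [myRep_substK d K HvK k hkp hkc (subV d k) items hg]
  apply flatMap_congr_mem
  intro it _
  match it with
  | .txt c => rfl
  | .br k' =>
    by_cases h1 : k' ∈ K
    · simp [substF, h1]
    · by_cases h2 : k' = k
      · subst h2; simp [substF, h1]
      · simp [substF, h1, h2]

theorem substK_covers (d : PySem.Dict (List Char) (List Char)) (K : List (List Char))
    (items : List PItem) (h : ∀ k, PItem.br k ∈ items → k ∈ K) :
    substK d K items = substAll d items := by
  apply flatMap_congr_mem
  intro it hit
  match it with
  | .txt c => rfl
  | .br k => simp [substF, substA, h k hit]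

theorem substK_nilK (d : PySem.Dict (List Char) (List Char)) (items : List PItem) :
    substK d [] items = items.flatMap renderI := by
  apply flatMap_congr_mem
  intro it _
  match it with
  | .txt c => rfl
  | .br k => simp [substF, renderI]

theorem findEnd_spec (s : List Char) (i : Nat) :
    ∀ u j w, s.drop j = u ++ ')' :: w → ')' ∉ u → evalFindEnd s i j = j + u.length := by
  intro u
  induction u with
  | nil =>
    intro j w hd _
    obtain ⟨hj, hc⟩ := drop_head_eq (by simpa using hd)
    rw [evalFindEnd, dif_pos hj, if_pos hc]
    simp
  | cons c u ih =>
    intro j w hd hmem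
    obtain ⟨hj, hc⟩ := drop_head_eq (by simpa using hd)
    have hcne : c ≠ ')' := fun h => hmem (h ▸ List.mem_cons_self)
    have hd' : s.drop (j + 1) = u ++ ')' :: w := by
      rw [← List.tail_drop, hd]
      simp
    rw [evalFindEnd, dif_pos hj, if_neg (by rw [hc]; exact hcne)]
    rw [ih (j + 1) w hd' (fun h => hmem (List.mem_cons_of_mem _ h))]
    simp only [List.length_cons]
    omega

theorem loopA_spec (cs : List Char) (d : PySem.Dict (List Char) (List Char))
    (all : List PItem) (HvI : ∀ k, PItem.br k ∈ all → '(' ∉ subV d k)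
    (Hall : ∀ it ∈ all, goodI it) :
    ∀ suf : List PItem, ∀ K : List (List Char), ∀ i : Nat, ∀ F : List Char,
      (∀ it ∈ suf, it ∈ all) →
      (∀ it ∈ suf, goodI it) →
      (∀ k' ∈ K, '(' ∉ subV d k') →
      (∀ k, PItem.br k ∈ all → PItem.br k ∈ suf ∨ k ∈ K) →
      cs.drop i = suf.flatMap renderI →
      F = substK d K all →
      evalLoop cs d F i = substAll d all := by
  intro suf
  induction suf with
  | nil =>
    intro K i F _ _ _ hcov hd hF
    have hlen : cs.length ≤ i := by
      by_contra h
      have h2 : cs.drop i ≠ [] := by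
        intro he
        rw [List.drop_eq_nil_iff] at he
        omega
      simp only [List.flatMap_nil] at hd
      exact h2 hd
    rw [evalLoop, dif_neg (by omega), hF]
    exact substK_covers d K all (fun k hk => (hcov k hk).elim (fun h => by simp at h) id)
  | cons it suf ih =>
    intro K i F hsub hg hvK hcov hd hF
    have hgit := hg it List.mem_cons_self
    have hgsuf : ∀ x ∈ suf, goodI x := fun x hx => hg x (List.mem_cons_of_mem _ hx)
    have hsub' : ∀ x ∈ suf, x ∈ all := fun x hx => hsub x (List.mem_cons_of_mem _ hx)
    match it with
    | .txt c =>
      have hc : c ≠ '(' := hgit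
      rw [List.flatMap_cons] at hd
      simp only [renderI, List.singleton_append] at hd
      obtain ⟨hi, hch⟩ := drop_head_eq hd
      have hd' : cs.drop (i + 1) = suf.flatMap renderI := by
        rw [← List.tail_drop, hd]
        rfl
      rw [evalLoop, dif_pos hi, if_neg (by rw [hch]; exact hc)]
      refine ih K (i + 1) F hsub' hgsuf hvK ?_ hd' hF
      intro k hk
      rcases hcov k hk with h1 | h1
      · rcases List.mem_cons.mp h1 with h2 | h2
        · exact absurd h2 (by simp)
        · exact Or.inl h2
      · exact Or.inr h1
    | .br k =>
      obtain ⟨hkp, hkc⟩ : '(' ∉ k ∧ ')' ∉ k := hgit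
      rw [List.flatMap_cons] at hd
      simp only [renderI] at hd
      have hd0 : cs.drop i = '(' :: (k ++ ')' :: suf.flatMap renderI) := by
        rw [hd]; simp
      obtain ⟨hi, hch⟩ := drop_head_eq hd0
      have hd1 : cs.drop (i + 1) = k ++ ')' :: suf.flatMap renderI := by
        rw [← List.tail_drop, hd0]
        rfl
      have hend : evalFindEnd cs i i = i + 1 + k.length := by
        rw [evalFindEnd, dif_pos hi, if_neg (by rw [hch]; decide)]
        rw [findEnd_spec cs i k (i + 1) _ hd1 hkc]
      have hkey : PySem.List.slice cs (some ((i : Int) + 1)) (some ((evalFindEnd cs i i : Nat) : Int)) = k := by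
        rw [hend]
        rw [show ((i : Int) + 1) = (((i + 1 : Nat) : Int)) by push_cast; ring]
        rw [PySem.List.slice_natCast]
        rw [hd1]
        rw [show i + 1 + k.length - (i + 1) = k.length by omega]
        exact List.take_left
      have hpat : PySem.List.slice cs (some (i : Int)) (some (((evalFindEnd cs i i : Nat) : Int) + 1)) = '(' :: (k ++ [')']) := by
        rw [hend]
        rw [show (((i + 1 + k.length : Nat) : Int) + 1) = (((i + 1 + k.length + 1 : Nat) : Int)) by push_cast; ring]
        rw [PySem.List.slice_natCast]
        rw [hd0]
        rw [show i + 1 + k.length + 1 - i = k.length + 2 by omega]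
        rw [show '(' :: (k ++ ')' :: suf.flatMap renderI) = ('(' :: (k ++ [')'])) ++ suf.flatMap renderI by simp]
        have hl2 : ('(' :: (k ++ [')'])).length = k.length + 2 := by simp
        rw [← hl2, List.take_left]
      have hd2 : cs.drop (evalFindEnd cs i i + 1) = suf.flatMap renderI := by
        rw [hend]
        have h3 : i + 1 + k.length + 1 = i + (k.length + 2) := by omega
        rw [h3, ← List.drop_drop, hd0]
        rw [show '(' :: (k ++ ')' :: suf.flatMap renderI) = ('(' :: (k ++ [')'])) ++ suf.flatMap renderI by simp]
        have hl2 : ('(' :: (k ++ [')'])).length = k.length + 2 := by simp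
        rw [← hl2, List.drop_left]
      rw [evalLoop, dif_pos hi, if_pos hch]
      simp only [hkey, hpat]
      have hrepl :
          (match PySem.Dict.get? d k with
            | some v => PySem.Chars.replace F ('(' :: (k ++ [')'])) v
            | none => PySem.Chars.replace F ('(' :: (k ++ [')'])) ['?'])
            = myRep ('(' :: (k ++ [')'])) (subV d k) F := by
        unfold subV
        rw [PySem.Dict.getD_eq_get?_getD]
        cases PySem.Dict.get? d k with
        | none => exact replace_eq_myRep F ('(' :: (k ++ [')'])) ['?'] (by simp)
        | some v => exact replace_eq_myRep F ('(' :: (k ++ [')'])) v (by simp)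
      rw [hrepl, hF]
      by_cases hK : k ∈ K
      · rw [myRep_substK_mem d K hvK k hkp hkc _ hK all Hall]
        refine ih K (evalFindEnd cs i i + 1) _ hsub' hgsuf hvK ?_ hd2 rfl
        intro j hj
        rcases hcov j hj with h1 | h1
        · rcases List.mem_cons.mp h1 with h2 | h2
          · exact Or.inr (by rw [PItem.br.injEq] at h2; exact h2 ▸ hK)
          · exact Or.inl h2
        · exact Or.inr h1
      · rw [myRep_substK_new d K hvK k hkp hkc all Hall]
        have hvK' : ∀ k' ∈ k :: K, '(' ∉ subV d k' := by
          intro k' hk'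
          rcases List.mem_cons.mp hk' with h1 | h1
          · exact h1 ▸ HvI k (hsub _ List.mem_cons_self)
          · exact hvK k' h1
        refine ih (k :: K) (evalFindEnd cs i i + 1) _ hsub' hgsuf hvK' ?_ hd2 rfl
        intro j hj
        rcases hcov j hj with h1 | h1
        · rcases List.mem_cons.mp h1 with h2 | h2
          · exact Or.inr (by rw [PItem.br.injEq] at h2; exact h2 ▸ List.mem_cons_self)
          · exact Or.inl h2
        · exact Or.inr (List.mem_cons_of_mem _ h1)

-- B's fold over one bracket's key accumulates the key characters
theorem foldB_key (d : PySem.Dict (List Char) (List Char)) :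
    ∀ (k : List Char), ')' ∉ k →
      ∀ p out l, (k ++ l).foldl (altStep d) (out, some p) = l.foldl (altStep d) (out, some (p ++ k)) := by
  intro k
  induction k with
  | nil => intro _ p out l; simp
  | cons c t ih =>
    intro hk p out l
    have hc : c ≠ ')' := fun h => hk (h ▸ List.mem_cons_self)
    rw [List.cons_append, List.foldl_cons]
    rw [show altStep d (out, some p) c = (out, some (p ++ [c])) by simp [altStep, hc]]
    rw [ih (fun h => hk (List.mem_cons_of_mem _ h)) (p ++ [c]) out l]
    simp

theorem foldB (d : PySem.Dict (List Char) (List Char)) :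
    ∀ items : List PItem, (∀ it ∈ items, goodI it) → ∀ out : List Char,
      (items.flatMap renderI).foldl (altStep d) (out, none) = (out ++ substAll d items, none) := by
  intro items
  induction items with
  | nil => intro _ out; simp [substAll]
  | cons it rest ih =>
    intro hg out
    have hgit := hg it List.mem_cons_self
    have hgrest : ∀ x ∈ rest, goodI x := fun x hx => hg x (List.mem_cons_of_mem _ hx)
    rw [List.flatMap_cons]
    match it with
    | .txt c =>
      have hc : c ≠ '(' := hgit
      rw [show renderI (.txt c) = [c] from rfl, List.singleton_append, List.foldl_cons]
      rw [show altStep d (out, none) c = (out ++ [c], none) by simp [altStep, hc]]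
      rw [ih hgrest (out ++ [c])]
      simp [substAll, substA]
    | .br k =>
      obtain ⟨_, hkc⟩ : '(' ∉ k ∧ ')' ∉ k := hgit
      rw [show renderI (.br k) = '(' :: (k ++ [')']) from rfl]
      rw [show ('(' :: (k ++ [')'])) ++ rest.flatMap renderI
            = '(' :: (k ++ (')' :: rest.flatMap renderI)) by simp]
      rw [List.foldl_cons]
      rw [show altStep d (out, none) '(' = (out, some []) by simp [altStep]]
      rw [foldB_key d k hkc [] out (')' :: rest.flatMap renderI)]
      rw [List.nil_append, List.foldl_cons]
      rw [show altStep d (out, some k) ')' = (out ++ PySem.Dict.getD d k ['?'], none) by simp [altStep]]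
      rw [ih hgrest _]
      simp [substAll, substA, subV]

theorem okS_key : ∀ t : List Char, okS true t = true →
    ∃ k r : List Char, t = k ++ ')' :: r ∧ '(' ∉ k ∧ ')' ∉ k ∧ okS false r = true := by
  intro t
  induction t with
  | nil => simp [okS]
  | cons c t ih =>
    intro h
    rw [okS] at h
    by_cases hc : c = ')'
    · rw [if_pos hc] at h
      exact ⟨[], t, by simp [hc], by simp, by simp, h⟩
    · rw [if_neg hc] at h
      by_cases hp : c = '('
      · rw [if_pos hp] at h
        simp at h
      · rw [if_neg hp] at h
        obtain ⟨k, r, ht, hkp, hkc, hr⟩ := ih h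
        refine ⟨c :: k, r, by simp [ht], ?_, ?_, hr⟩
        · intro hm
          rcases List.mem_cons.mp hm with h1 | h1
          · exact hp h1.symm
          · exact hkp h1
        · intro hm
          rcases List.mem_cons.mp hm with h1 | h1
          · exact hc h1.symm
          · exact hkc h1

theorem parse_ok : ∀ cs : List Char, okS false cs = true →
    ∃ items : List PItem, (∀ it ∈ items, goodI it) ∧ cs = items.flatMap renderI := by
  intro cs
  match cs with
  | [] => exact fun _ => ⟨[], by simp, by simp⟩
  | c :: t =>
    intro h
    rw [okS] at h
    by_cases hc : c = '('
    · rw [if_pos hc] at h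
      obtain ⟨k, r, ht, hkp, hkc, hr⟩ := okS_key t h
      have hlt : r.length < (c :: t).length := by
        have h4 := congrArg List.length ht
        simp at h4 ⊢
        omega
      obtain ⟨items, hgood, heqi⟩ := parse_ok r hr
      refine ⟨PItem.br k :: items, ?_, ?_⟩
      · intro it hit
        rcases List.mem_cons.mp hit with h1 | h1
        · subst h1
          exact ⟨hkp, hkc⟩
        · exact hgood it h1
      · rw [List.flatMap_cons, ← heqi]
        subst hc
        simp only [renderI, List.cons_append, List.append_assoc, List.nil_append]
        rw [← ht]
    · rw [if_neg hc] at h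
      obtain ⟨items, hgood, heqi⟩ := parse_ok t h
      refine ⟨PItem.txt c :: items, ?_, ?_⟩
      · intro it hit
        rcases List.mem_cons.mp hit with h1 | h1
        · subst h1; exact hc
        · exact hgood it h1
      · rw [List.flatMap_cons, ← heqi]
        simp [renderI]
termination_by cs => cs.length
decreasing_by
  · simp only [List.length_cons] at hlt ⊢
    omega
  · simp only [List.length_cons]
    omega

theorem dict_values_ok (cs : List Char) :
    ∀ (kn : List (List String)) (d0 : PySem.Dict (List Char) (List Char)),
      (∀ pair ∈ kn,
        PySem.Chars.isIn ('(' :: ((pair.getD 0 "").toList ++ [')'])) cs = false ∨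
          '(' ∉ (pair.getD 1 "").toList) →
      (∀ k, PySem.Chars.isIn ('(' :: (k ++ [')'])) cs = true → '(' ∉ subV d0 k) →
      ∀ k, PySem.Chars.isIn ('(' :: (k ++ [')'])) cs = true →
        '(' ∉ subV (kn.foldl
          (fun d pair => PySem.Dict.insert d (pair.getD 0 "").toList (pair.getD 1 "").toList) d0) k := by
  intro kn
  induction kn with
  | nil => intro d0 _ h0 k hin; exact h0 k hin
  | cons pair rest ih =>
    intro d0 hkn h0 k hin
    rw [List.foldl_cons]
    refine ih _ (fun p hp => hkn p (List.mem_cons_of_mem _ hp)) ?_ k hin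
    intro j hjin
    unfold subV
    rw [PySem.Dict.getD_insert]
    by_cases hj : j = (pair.getD 0 "").toList
    · rw [if_pos hj]
      rcases hkn pair List.mem_cons_self with h1 | h1
      · rw [hj] at hjin
        rw [hjin] at h1
        simp at h1
      · exact h1
    · rw [if_neg hj]
      exact h0 j hjin

theorem render_infix (items : List PItem) (k : List Char) (h : PItem.br k ∈ items) :
    ('(' :: (k ++ [')'])) <:+: items.flatMap renderI := by
  obtain ⟨l1, l2, rfl⟩ := List.append_of_mem h
  rw [List.flatMap_append, List.flatMap_cons]
  exact ⟨l1.flatMap renderI, l2.flatMap renderI, by simp [renderI]⟩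

-- ===== VERDICT (by name: the statement is the Claim_ definition above) =====
theorem evaluate_spec : Claim_equal_evaluate := by
  intro s knowledge _hdom hpre
  obtain ⟨hok, hkn⟩ := hpre
  unfold Spec_evaluate evaluate evaluate_alt
  simp only
  set d := knowledge.foldl
    (fun d pair => PySem.Dict.insert d (pair.getD 0 "").toList (pair.getD 1 "").toList)
    (PySem.Dict.empty : PySem.Dict (List Char) (List Char)) with hd
  have Hv : ∀ k, PySem.Chars.isIn ('(' :: (k ++ [')'])) s.toList = true → '(' ∉ subV d k := by
    rw [hd]
    refine dict_values_ok s.toList knowledge _ (fun p hp => (hkn p hp).2) ?_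
    intro k _
    unfold subV
    rw [PySem.Dict.getD_empty]
    simp
  obtain ⟨items, hgood, heq⟩ := parse_ok s.toList hok
  have HvI : ∀ k, PItem.br k ∈ items → '(' ∉ subV d k := by
    intro k hk
    refine Hv k ?_
    rw [PySem.Chars.isIn_iff_infix, heq]
    exact render_infix items k hk
  have hA : evalLoop s.toList d s.toList 0 = substAll d items := by
    refine loopA_spec s.toList d items HvI hgood items [] 0 s.toList
      (fun it h => h) hgood (by simp) (fun k h => Or.inl h) (by simpa using heq) ?_
    rw [substK_nilK, heq]
  have hB : s.toList.foldl (altStep d) ([], none) = (substAll d items, none) := by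
    rw [heq]
    simpa using foldB d items hgood []
  rw [hA, hB]
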